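-- pv_equiv track=rewrite | github.com/PaddlePaddle/docs | doc/fluid/api_cn/chinese_samplecode_processor.py | check_indent
-- ===== SOURCE A (Python) =====
-- def check_indent(code_line):
--     indent = ""
--     for c in code_line:
--         if c == '\t':
--             indent += '    '
--         elif c == ' ':
--             indent += ' '
--         if c != ' ' and c != '\t':
--             break
--     return indent
-- ===== SOURCE B (Python) =====
-- def check_indent(code_line):
--     prefix = code_line[:len(code_line) - len(code_line.lstrip(' \t'))]
--     return prefix.replace('\t', '    ')
-- ===== Notes on version B (the rewrite author's own statement) =====
-- stated objective: simpler
-- what changed: Replaces the explicit per-character loop with break and string accumulation by two library passes: slice off the leading prefix of spaces and tabs via lstrip restricted to those two characters, then expand each tab to four spaces with one replace call.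
import Mathlib
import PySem

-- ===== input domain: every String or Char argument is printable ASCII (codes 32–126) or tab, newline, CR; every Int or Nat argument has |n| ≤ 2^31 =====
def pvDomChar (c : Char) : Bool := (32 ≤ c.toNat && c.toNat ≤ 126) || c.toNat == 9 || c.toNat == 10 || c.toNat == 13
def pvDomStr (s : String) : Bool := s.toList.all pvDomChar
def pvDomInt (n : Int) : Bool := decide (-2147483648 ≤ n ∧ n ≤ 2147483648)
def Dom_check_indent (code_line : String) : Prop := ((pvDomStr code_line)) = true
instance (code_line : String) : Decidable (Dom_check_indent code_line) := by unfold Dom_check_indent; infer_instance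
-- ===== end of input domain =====

-- B replaces A's per-character loop with break by a slice of the space/tab prefix plus one replace call (simpler; same cost).

-- ===== PORT A =====
-- the 'for c in code_line: … break' loop, carrying the accumulated indent
def checkIndentGo (acc : List Char) : List Char → List Char
  | [] => acc
  | c :: cs =>
    let acc' := if c == '\t' then acc ++ [' ', ' ', ' ', ' ']
                else if c == ' ' then acc ++ [' '] else acc
    if c != ' ' && c != '\t' then acc' else checkIndentGo acc' cs

def check_indent (code_line : String) : String :=
  String.mk (checkIndentGo [] code_line.toList)

-- ===== PORT B =====
-- code_line.lstrip(' \t') ported by hand: drop leading spaces/tabs — exact for this two-char set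
def check_indent_alt (code_line : String) : String :=
  -- prefix = code_line[:len(code_line) - len(code_line.lstrip(' \t'))]; return prefix.replace('\t','    ')
  String.mk (PySem.Chars.replace
    (PySem.List.slice code_line.toList none
      (some ((code_line.toList.length -
        (code_line.toList.dropWhile (fun c => c == ' ' || c == '\t')).length : Nat) : Int)))
    ['\t'] [' ', ' ', ' ', ' '])

-- ===== PRECONDITION & SPEC =====
def Spec_check_indent (code_line : String) (out : String) : Prop := out = check_indent_alt code_line
instance (code_line : String) (out : String) : Decidable (Spec_check_indent code_line out) := by unfold Spec_check_indent; infer_instance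

-- ===== CLAIM (what is proved, stated in full; the proofs are below) =====
def Claim_equal_check_indent : Prop := ∀ (code_line : String), Dom_check_indent code_line → Spec_check_indent code_line (check_indent code_line)

-- ===== LEMMAS AND PROOFS =====

-- single-char replace is an elementwise expansion
lemma replace_go_single (t : Char) (new : List Char) :
    ∀ (fuel : Nat) (l acc : List Char), l.length ≤ fuel →
    PySem.Chars.replace.go [t] new fuel l acc
      = acc.reverse ++ l.flatMap (fun c => if c = t then new else [c]) := by
  intro fuel
  induction fuel with
  | zero =>
    intro l acc h
    have : l = [] := List.eq_nil_of_length_eq_zero (Nat.le_zero.mp h)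
    subst this
    simp [PySem.Chars.replace.go]
  | succ n ih =>
    intro l acc h
    cases l with
    | nil => simp [PySem.Chars.replace.go]
    | cons c cs =>
      simp only [PySem.Chars.replace.go]
      by_cases hc : c = t
      · subst hc
        have hpre : List.isPrefixOf [c] (c :: cs) = true := by
          simp [List.isPrefixOf]
        simp only [hpre]
        rw [show List.drop (List.length [c]) (c :: cs) = cs by simp]
        rw [ih cs _ (by simpa using Nat.le_of_succ_le_succ h)]
        simp
      · have hpre : List.isPrefixOf [t] (c :: cs) = false := by
          simp [List.isPrefixOf]
          exact fun he => absurd he.symm hc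
        simp only [hpre]
        rw [if_neg (by simp)]
        rw [ih cs _ (by simpa using Nat.le_of_succ_le_succ h)]
        simp [hc]

lemma replace_single (t : Char) (new l : List Char) :
    PySem.Chars.replace l [t] new
      = l.flatMap (fun c => if c = t then new else [c]) := by
  simp only [PySem.Chars.replace, List.isEmpty]
  rw [replace_go_single t new l.length l [] (le_refl _)]
  simp

-- A's loop computes the expansion of the space/tab prefix
lemma checkIndentGo_eq (cs : List Char) : ∀ (acc : List Char),
    checkIndentGo acc cs
      = acc ++ (cs.takeWhile (fun c => c == ' ' || c == '\t')).flatMap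
          (fun c => if c = '\t' then [' ', ' ', ' ', ' '] else [c]) := by
  induction cs with
  | nil => intro acc; simp [checkIndentGo]
  | cons c cs ih =>
    intro acc
    by_cases ht : c = '\t'
    · subst ht
      simp only [checkIndentGo, List.takeWhile]
      norm_num
      rw [ih]
      simp
    · by_cases hs : c = ' '
      · subst hs
        simp only [checkIndentGo, List.takeWhile]
        norm_num
        rw [ih]
        simp
      · simp only [checkIndentGo, List.takeWhile]
        have h1 : (c == '\t') = false := by simp [ht]
        have h2 : (c == ' ') = false := by simp [hs]
        simp [h1, h2]
        intro h
        exact absurd (h hs) ht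

lemma take_sub_dropWhile (p : Char → Bool) (cs : List Char) :
    cs.take (cs.length - (cs.dropWhile p).length) = cs.takeWhile p := by
  induction cs with
  | nil => simp
  | cons c cs ih =>
    by_cases hc : p c
    · have hle : (List.dropWhile p cs).length ≤ cs.length := List.length_dropWhile_le p cs
      simp [hc, Nat.succ_sub hle, ih]
    · simp [hc]

-- ===== VERDICT (by name: the statement is the Claim_ definition above) =====
theorem check_indent_spec : Claim_equal_check_indent := by
  intro code_line _
  unfold Spec_check_indent check_indent check_indent_alt
  rw [PySem.List.slice_to, Int.toNat_natCast, take_sub_dropWhile, replace_single,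
    checkIndentGo_eq]
  · simp
  · positivity
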